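-- pv_equiv track=rewrite | github.com/drawnator/p1UFCG | cobrinha.py | cobrinha
-- ===== SOURCE A (Python) =====
-- def cobrinha(M):
--     listanova = []
--     for i in range(len(M)):
--         if i%2 == 0:
--             for j in range(len(M[i])):
--                 if M[i][j]%2 != 0: listanova.append(M[i][j])
--         else:
--             for j in range(len(M[i])-1,-1,-1):
--                 if M[i][j]%2 != 0: listanova.append(M[i][j])
--     return listanova
-- ===== SOURCE B (Python) =====
-- def cobrinha(M):
--     # Two staged passes: recursively materialize the full snake-order traversal
--     # (consuming rows two at a time, no parity index), then filter the odds.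
--     def snake(rows):
--         if len(rows) < 2:
--             return list(rows[0]) if rows else []
--         return list(rows[0]) + rows[1][::-1] + snake(rows[2:])
--     return [x for x in snake(M) if x % 2 != 0]
-- ===== Notes on version B (the rewrite author's own statement) =====
-- stated objective: alternative
-- what changed: Replaces A's single indexed pass with inner filter-while-traversing loops by two staged passes: a parity-free recursion that consumes rows two at a time to materialize the whole snake-order traversal, then one filter pass over that flattened sequence.
import Mathlib
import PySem

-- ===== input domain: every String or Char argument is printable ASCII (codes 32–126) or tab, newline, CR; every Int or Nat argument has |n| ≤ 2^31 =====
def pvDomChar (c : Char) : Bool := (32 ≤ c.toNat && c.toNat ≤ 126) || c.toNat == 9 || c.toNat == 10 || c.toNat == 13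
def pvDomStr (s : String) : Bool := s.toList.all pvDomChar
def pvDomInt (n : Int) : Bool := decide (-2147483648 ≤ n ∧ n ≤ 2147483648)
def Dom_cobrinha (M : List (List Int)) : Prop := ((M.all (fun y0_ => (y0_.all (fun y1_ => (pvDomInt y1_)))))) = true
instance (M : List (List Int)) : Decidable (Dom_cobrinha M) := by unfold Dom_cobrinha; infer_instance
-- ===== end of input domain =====

-- B materializes the snake-order traversal by a parity-free two-rows-at-a-time recursion, then filters odds in a second pass; alternative decomposition, same cost.

-- ===== PORT A =====
def cobrinha (M : List (List Int)) : List Int :=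
  (PySem.List.pyRange 0 (PySem.List.len M) 1).foldl (fun listanova i =>
    if PySem.Int.mod i 2 = 0 then
      (PySem.List.pyRange 0 (PySem.List.len (PySem.List.pyGetD M i [])) 1).foldl
        (fun acc j =>
          if PySem.Int.mod (PySem.List.pyGetD (PySem.List.pyGetD M i []) j 0) 2 ≠ 0 then
            acc ++ [PySem.List.pyGetD (PySem.List.pyGetD M i []) j 0]
          else acc) listanova
    else
      (PySem.List.pyRange (PySem.List.len (PySem.List.pyGetD M i []) - 1) (-1) (-1)).foldl
        (fun acc j =>
          if PySem.Int.mod (PySem.List.pyGetD (PySem.List.pyGetD M i []) j 0) 2 ≠ 0 then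
            acc ++ [PySem.List.pyGetD (PySem.List.pyGetD M i []) j 0]
          else acc) listanova) []

-- ===== PORT B =====
-- snake(rows): on the pattern r1 :: r2 :: rest, Python's rows[2:] is exactly rest,
-- and rows[1][::-1] is exactly r2.reverse (a full step -1 slice of a list).
def snakeB : List (List Int) → List Int
  | [] => []
  | [r] => r
  | r1 :: r2 :: rest => r1 ++ r2.reverse ++ snakeB rest

def cobrinha_alt (M : List (List Int)) : List Int :=
  (snakeB M).filter (fun x => PySem.Int.mod x 2 ≠ 0)

-- ===== PRECONDITION & SPEC =====
def Spec_cobrinha (M : List (List Int)) (out : List Int) : Prop := out = cobrinha_alt M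
instance (M : List (List Int)) (out : List Int) : Decidable (Spec_cobrinha M out) := by unfold Spec_cobrinha; infer_instance

-- ===== CLAIM (what is proved, stated in full; the proofs are below) =====
def Claim_equal_cobrinha : Prop := ∀ (M : List (List Int)), Dom_cobrinha M → Spec_cobrinha M (cobrinha M)

-- ===== LEMMAS AND PROOFS =====

-- proof-only intermediate form of A: recursion over rows carrying the row index
def gA : List (List Int) → Int → List Int
  | [], _ => []
  | r :: rs, i =>
      (if PySem.Int.mod i 2 = 0 then r.filter (fun x => PySem.Int.mod x 2 ≠ 0)
       else (r.filter (fun x => PySem.Int.mod x 2 ≠ 0)).reverse) ++ gA rs (i + 1)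

-- one row's forward append-if loop equals appending the row's odds
lemma row_even (row acc : List Int) :
    (PySem.List.pyRange 0 (PySem.List.len row) 1).foldl
      (fun acc j => if PySem.Int.mod (PySem.List.pyGetD row j 0) 2 ≠ 0 then
        acc ++ [PySem.List.pyGetD row j 0] else acc) acc
    = acc ++ row.filter (fun x => PySem.Int.mod x 2 ≠ 0) := by
  rw [show (PySem.List.len row) = ((row.length : Int)) from by simp [PySem.List.len],
      PySem.List.foldl_pyRange_zero_pyGetD' row 0
        (fun acc x => if PySem.Int.mod x 2 ≠ 0 then acc ++ [x] else acc) acc,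
      PySem.List.foldl_append_ite_eq_filter]

-- one row's backward append-if loop equals appending the reversed odds
lemma row_odd (row acc : List Int) :
    (PySem.List.pyRange (PySem.List.len row - 1) (-1) (-1)).foldl
      (fun acc j => if PySem.Int.mod (PySem.List.pyGetD row j 0) 2 ≠ 0 then
        acc ++ [PySem.List.pyGetD row j 0] else acc) acc
    = acc ++ (row.filter (fun x => PySem.Int.mod x 2 ≠ 0)).reverse := by
  have h1 : PySem.List.pyRange (PySem.List.len row - 1) (-1) (-1)
      = (PySem.List.pyRange 0 (PySem.List.len row) 1).reverse := by
    rw [PySem.List.pyRange_neg_one_eq_reverse]; norm_num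
  have h2 : (PySem.List.pyRange 0 (PySem.List.len row) 1).map
      (fun j => PySem.List.pyGetD row j 0) = row := by
    simpa using PySem.List.map_pyGetD_pyRange_zero row 0
  calc (PySem.List.pyRange (PySem.List.len row - 1) (-1) (-1)).foldl
        (fun acc j => if PySem.Int.mod (PySem.List.pyGetD row j 0) 2 ≠ 0 then
          acc ++ [PySem.List.pyGetD row j 0] else acc) acc
      = (((PySem.List.pyRange 0 (PySem.List.len row) 1).reverse).map
          (fun j => PySem.List.pyGetD row j 0)).foldl
          (fun acc x => if PySem.Int.mod x 2 ≠ 0 then acc ++ [x] else acc) acc := by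
        rw [h1, List.foldl_map]
    _ = (row.reverse).foldl
          (fun acc x => if PySem.Int.mod x 2 ≠ 0 then acc ++ [x] else acc) acc := by
        rw [List.map_reverse, h2]
    _ = acc ++ (row.reverse).filter (fun x => PySem.Int.mod x 2 ≠ 0) := by
        rw [PySem.List.foldl_append_ite_eq_filter]
    _ = acc ++ (row.filter (fun x => PySem.Int.mod x 2 ≠ 0)).reverse := by
        rw [List.filter_reverse]

-- A's outer foldl over enumerate equals gA
lemma foldl_enum_eq_gA (M : List (List Int)) (k : Int) (acc : List Int) :
    (PySem.List.enumerate M k).foldl (fun acc p =>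
        (if PySem.Int.mod p.1 2 = 0 then p.2.filter (fun x => PySem.Int.mod x 2 ≠ 0)
         else (p.2.filter (fun x => PySem.Int.mod x 2 ≠ 0)).reverse) |> (acc ++ ·)) acc
    = acc ++ gA M k := by
  induction M generalizing k acc with
  | nil => simp [PySem.List.enumerate_nil, gA]
  | cons r rs ih =>
    rw [PySem.List.enumerate_cons, List.foldl_cons, ih]
    simp [gA]

-- parity step: gA is invariant under shifting the index by 2
lemma gA_add_two (M : List (List Int)) (i : Int) : gA M (i + 2) = gA M i := by
  induction M generalizing i with
  | nil => rfl
  | cons r rs ih =>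
    have hm : PySem.Int.mod (i + 2) 2 = PySem.Int.mod i 2 := by
      simp [PySem.Int.mod, Int.fmod_eq_emod]
    simp only [gA, hm]
    have : i + 2 + 1 = (i + 1) + 2 := by ring
    rw [this, ih]

-- gA from index 0 is the filtered snake traversal
lemma gA_zero_eq (M : List (List Int)) :
    gA M 0 = (snakeB M).filter (fun x => PySem.Int.mod x 2 ≠ 0) := by
  induction M using snakeB.induct with
  | case1 => rfl
  | case2 r => simp [gA, snakeB]
  | case3 r1 r2 rest ih =>
    have h2 : gA rest 2 = gA rest 0 := by simpa using gA_add_two rest 0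
    simp [gA, snakeB, h2, List.filter_append, List.filter_reverse]
    simpa using ih

-- ===== VERDICT (by name: the statement is the Claim_ definition above) =====
theorem cobrinha_spec : Claim_equal_cobrinha := by
  intro M _
  unfold Spec_cobrinha cobrinha cobrinha_alt
  have hfun : (fun (listanova : List Int) (i : Int) =>
      if PySem.Int.mod i 2 = 0 then
        (PySem.List.pyRange 0 (PySem.List.len (PySem.List.pyGetD M i [])) 1).foldl
          (fun acc j =>
            if PySem.Int.mod (PySem.List.pyGetD (PySem.List.pyGetD M i []) j 0) 2 ≠ 0 then
              acc ++ [PySem.List.pyGetD (PySem.List.pyGetD M i []) j 0]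
            else acc) listanova
      else
        (PySem.List.pyRange (PySem.List.len (PySem.List.pyGetD M i []) - 1) (-1) (-1)).foldl
          (fun acc j =>
            if PySem.Int.mod (PySem.List.pyGetD (PySem.List.pyGetD M i []) j 0) 2 ≠ 0 then
              acc ++ [PySem.List.pyGetD (PySem.List.pyGetD M i []) j 0]
            else acc) listanova)
      = (fun (listanova : List Int) (i : Int) =>
          listanova ++ (if PySem.Int.mod i 2 = 0 then
              (PySem.List.pyGetD M i []).filter (fun x => PySem.Int.mod x 2 ≠ 0)
            else ((PySem.List.pyGetD M i []).filter (fun x => PySem.Int.mod x 2 ≠ 0)).reverse)) := by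
    funext acc i
    by_cases h : PySem.Int.mod i 2 = 0
    · rw [if_pos h, if_pos h, row_even]
    · rw [if_neg h, if_neg h, row_odd]
  rw [hfun, ← gA_zero_eq]
  have henum := PySem.List.enumerate_eq_map_pyRange M ([] : List Int)
  have := foldl_enum_eq_gA M 0 []
  rw [henum, List.foldl_map] at this
  simpa using this
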